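-- pv_equiv track=rewrite | github.com/PKU-DAIR/Hetu-DiT | hetu_dit/core/distributed/parallel_state.py | _generate_sp_group_ranks
-- ===== SOURCE A (Python) =====
-- from typing import List, Optional, Dict, Tuple
--
-- def _generate_sp_group_ranks(
--     ranks: List[int]
-- ) -> List[Tuple[List[List[int]], int, int]]:
--     """Generate all possible combinations of group_ranks for sequence parallel
--
--     Args:
--         ranks: The ranks list to participate in sequence parallel
--
--     Returns:
--         List of (group_ranks, ulysses_degree, ring_degree)
--     """
--     n = len(ranks)
--     sp_combinations = []
--
--     # get all possible ulysses_degree and ring_degree combinations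
--     for i in range(n.bit_length()):
--         ulysses_degree = 1 << i  # 2^i
--         if ulysses_degree > n:
--             break
--
--         for j in range(n.bit_length()):
--             ring_degree = 1 << j  # 2^i
--             if ring_degree > n:
--                 break
--
--             if ulysses_degree * ring_degree == n:
--                 # Use the logic of set_seq_parallel_pg to generate group_ranks
--                 num_ulysses_pgs = ring_degree
--                 num_ring_pgs = ulysses_degree
--
--                 # generate ulysses groups
--                 ulysses_groups = []
--                 for i in range(num_ulysses_pgs):
--                     ulysses_ranks = ranks[
--                         i * ulysses_degree : (i + 1) * ulysses_degree
--                     ]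
--                     ulysses_groups.append(ulysses_ranks)
--
--                 # generate ring groups
--                 ring_groups = []
--                 for i in range(num_ring_pgs):
--                     ring_ranks = ranks[i::num_ring_pgs]
--                     ring_groups.append(ring_ranks)
--
--                 # combine as one group_ranks
--                 group_ranks = ulysses_groups + ring_groups
--                 sp_combinations.append((group_ranks, ulysses_degree, ring_degree))
--
--     return sp_combinations
-- ===== SOURCE B (Python) =====
-- def _generate_sp_group_ranks(ranks):
--     """Bucket-distribution: instead of slicing, make ONE pass over enumerate(ranks)
--     per degree pair, appending each rank to its ulysses bucket (idx // u) and its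
--     ring bucket (idx % u); the nested factor search collapses to a power-of-two
--     test on n with ring degree n >> i."""
--     n = len(ranks)
--     if n == 0 or n & (n - 1):
--         return []
--     combos = []
--     for i in range(n.bit_length()):
--         u = 1 << i
--         r = n >> i
--         ulysses = [[] for _ in range(r)]
--         ring = [[] for _ in range(u)]
--         for idx, x in enumerate(ranks):
--             ulysses[idx // u].append(x)
--             ring[idx % u].append(x)
--         combos.append((ulysses + ring, u, r))
--     return combos
-- ===== Notes on version B (the rewrite author's own statement) =====
-- stated objective: alternative
-- what changed: B replaces A's nested power-of-two factor search and slice-based group construction by one up-front power-of-two test on len(ranks) and, per degree pair, a single bucket-distribution pass over enumerate(ranks) that appends each rank to its ulysses bucket idx//u and its ring bucket idx%u, with ring degree computed directly as n>>i.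
import Mathlib
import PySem

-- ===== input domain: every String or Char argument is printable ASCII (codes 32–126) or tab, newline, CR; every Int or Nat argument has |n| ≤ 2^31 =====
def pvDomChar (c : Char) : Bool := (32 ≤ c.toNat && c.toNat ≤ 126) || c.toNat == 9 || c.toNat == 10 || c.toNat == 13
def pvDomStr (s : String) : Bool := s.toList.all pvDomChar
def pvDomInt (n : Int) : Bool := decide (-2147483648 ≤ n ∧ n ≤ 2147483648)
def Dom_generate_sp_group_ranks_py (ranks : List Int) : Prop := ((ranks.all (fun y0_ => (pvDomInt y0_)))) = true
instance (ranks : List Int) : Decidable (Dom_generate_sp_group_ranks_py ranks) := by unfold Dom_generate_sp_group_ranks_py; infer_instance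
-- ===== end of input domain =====

-- B replaces A's nested power-of-two factor search and slice-built groups by one
-- power-of-two test on len(ranks) and a single bucket-distribution pass per degree
-- pair that appends each rank to bucket idx//u and bucket idx%u (alternative).

-- ===== PORT A =====
-- A builds ulysses groups as the contiguous slices ranks[g*u:(g+1)*u] and ring
-- groups as the strided slices ranks[g::u]. The step u is ≥ 1 whenever this is
-- called, so slice? is always 'some' and the '.getD []' default never fires.
def pvMkGroups (ranks : List Int) (u r : Nat) : List (List Int) :=
  (List.range r).map (fun g : Nat => PySem.List.slice ranks (some ((g : Int) * (u : Int))) (some (((g : Int) + 1) * (u : Int))))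
  ++ (List.range u).map (fun g : Nat => (PySem.List.slice? ranks (some (g : Int)) none (u : Int)).getD [])

-- inner 'for j in range(n.bit_length())' with its break
def pvAInner (ranks : List Int) (n u : Nat) : List Nat → List (List (List Int) × Int × Int)
  | [] => []
  | j :: js =>
    let r := 1 <<< j
    if n < r then []
    else (if u * r = n then [(pvMkGroups ranks u r, (u : Int), (r : Int))] else [])
         ++ pvAInner ranks n u js

-- outer 'for i in range(n.bit_length())' with its break
def pvAOuter (ranks : List Int) (n : Nat) : List Nat → List (List (List Int) × Int × Int)
  | [] => []
  | i :: is =>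
    let u := 1 <<< i
    if n < u then []
    else pvAInner ranks n u (List.range (PySem.Int.bitLength (n : Int)))
         ++ pvAOuter ranks n is

def generate_sp_group_ranks_py (ranks : List Int) : List (List (List Int) × Int × Int) :=
  let n := ranks.length
  pvAOuter ranks n (List.range (PySem.Int.bitLength (n : Int)))

-- ===== PORT B =====
-- one step of B's inner pass: ulysses[idx // u].append(x); ring[idx % u].append(x).
-- Exact: enumerate indices are ≥ 0, so '.toNat' is the identity on them and Python's
-- '//' and '%' by the positive u coincide with Nat division and remainder.
def pvDistStep (u : Nat) (st : List (List Int) × List (List Int)) (p : Int × Int) :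
    List (List Int) × List (List Int) :=
  (st.1.modify (p.1.toNat / u) (· ++ [p.2]), st.2.modify (p.1.toNat % u) (· ++ [p.2]))

def generate_sp_group_ranks_py_alt (ranks : List Int) : List (List (List Int) × Int × Int) :=
  let n := ranks.length
  if n = 0 ∨ PySem.Int.band (n : Int) ((n : Int) - 1) ≠ 0 then []
  else
    (List.range (PySem.Int.bitLength (n : Int))).map (fun i =>
      let u := 1 <<< i
      let r := n >>> i
      let st := (PySem.List.enumerate ranks).foldl (pvDistStep u)
        (List.replicate r [], List.replicate u [])
      (st.1 ++ st.2, (u : Int), (r : Int)))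

-- ===== PRECONDITION & SPEC =====
def Spec_generate_sp_group_ranks_py (ranks : List Int) (out : List (List (List Int) × Int × Int)) : Prop := out = generate_sp_group_ranks_py_alt ranks
instance (ranks : List Int) (out : List (List (List Int) × Int × Int)) : Decidable (Spec_generate_sp_group_ranks_py ranks out) := by unfold Spec_generate_sp_group_ranks_py; infer_instance

-- ===== CLAIM (what is proved, stated in full; the proofs are below) =====
def Claim_equal_generate_sp_group_ranks_py : Prop := ∀ (ranks : List Int), Dom_generate_sp_group_ranks_py ranks → Spec_generate_sp_group_ranks_py ranks (generate_sp_group_ranks_py ranks)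

-- ===== LEMMAS AND PROOFS =====

-- ---- arithmetic: n & (n-1) = 0 iff n is a power of two; bit length of 2^k ----

theorem pv_land_even (m : Nat) (hm : m ≠ 0) : (2*m) &&& (2*m - 1) = 2 * (m &&& (m-1)) := by
  have h2 : 2*m - 1 = Nat.bit true (m-1) := by simp only [Nat.bit_true]; omega
  have h1 : 2*m = Nat.bit false m := by simp only [Nat.bit_false]
  rw [h2, h1, Nat.land_bit]
  simp [Nat.bit]

theorem pv_land_odd (m : Nat) : (2*m+1) &&& (2*m) = 2 * m := by
  have h1 : 2*m+1 = Nat.bit true m := by simp only [Nat.bit_true]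
  have h2 : 2*m = Nat.bit false m := by simp only [Nat.bit_false]
  rw [h1, h2, Nat.land_bit]
  simp [Nat.bit]

theorem pv_land_pred_eq_zero_iff (n : Nat) (h : n ≠ 0) :
    n &&& (n - 1) = 0 ↔ ∃ k, n = 2 ^ k := by
  induction n using Nat.strong_induction_on with
  | _ n ih =>
    constructor
    · intro hz
      rcases Nat.even_or_odd n with ⟨m, hm⟩ | ⟨m, hm⟩
      · have hn2 : n = 2 * m := by omega
        have hm0 : m ≠ 0 := by omega
        subst hn2
        rw [pv_land_even m hm0] at hz
        have hmz : m &&& (m - 1) = 0 := by omega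
        obtain ⟨k, hk⟩ := (ih m (by omega) hm0).mp hmz
        exact ⟨k + 1, by rw [hk]; ring⟩
      · subst hm
        have hs : 2*m+1-1 = 2*m := by omega
        rw [hs, pv_land_odd m] at hz
        have : m = 0 := by omega
        exact ⟨0, by omega⟩
    · rintro ⟨k, rfl⟩
      clear ih h
      induction k with
      | zero => decide
      | succ k ihk =>
        have h1 : (2:Nat)^(k+1) = 2 * 2^k := by ring
        rw [h1, pv_land_even _ (by positivity), ihk]

theorem pv_bitLength_two_pow (k : Nat) :
    PySem.Int.bitLength ((2 ^ k : Nat) : Int) = k + 1 := by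
  have hne : ((2 ^ k : Nat) : Int) ≠ 0 := by positivity
  have h1 := PySem.Int.two_pow_bitLength_le ((2 ^ k : Nat) : Int) hne
  have h2 := PySem.Int.lt_two_pow_bitLength ((2 ^ k : Nat) : Int)
  have habs : ((2 ^ k : Nat) : Int).natAbs = 2 ^ k := by simp
  rw [habs] at h1 h2
  have hb1 : PySem.Int.bitLength ((2 ^ k : Nat) : Int) - 1 ≤ k :=
    (Nat.pow_le_pow_iff_right (by norm_num)).mp h1
  have hb2 : k < PySem.Int.bitLength ((2 ^ k : Nat) : Int) :=
    (Nat.pow_lt_pow_iff_right (by norm_num)).mp h2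
  omega

-- ---- characterising A ----

theorem pvAInner_no_match (ranks : List Int) (n u : Nat)
    (h : ∀ j : Nat, u * 2 ^ j ≠ n) (js : List Nat) :
    pvAInner ranks n u js = [] := by
  induction js with
  | nil => rfl
  | cons j js ih =>
    simp only [pvAInner, Nat.one_shiftLeft]
    split
    · rfl
    · rw [if_neg (h j), ih]; rfl

theorem pvAOuter_no_match (ranks : List Int) (n : Nat)
    (h : ∀ i j : Nat, 2 ^ i * 2 ^ j ≠ n) (is : List Nat) :
    pvAOuter ranks n is = [] := by
  induction is with
  | nil => rfl
  | cons i is ih =>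
    simp only [pvAOuter, Nat.one_shiftLeft]
    split
    · rfl
    · rw [pvAInner_no_match ranks n (2 ^ i) (h i), ih]; rfl

theorem pv_flatMap_ind_nil {α : Type} (e : α) (j0 : Nat) (js : List Nat) (h : j0 ∉ js) :
    js.flatMap (fun j => if j = j0 then [e] else []) = [] := by
  induction js with
  | nil => rfl
  | cons a js ih =>
    simp only [List.flatMap_cons]
    rw [if_neg (by rintro rfl; exact h (List.mem_cons_self)), ih (fun hm => h (List.mem_cons_of_mem _ hm))]
    rfl

theorem pv_flatMap_ind {α : Type} (e : α) (j0 : Nat) (js : List Nat)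
    (hnd : js.Nodup) (hmem : j0 ∈ js) :
    js.flatMap (fun j => if j = j0 then [e] else []) = [e] := by
  induction js with
  | nil => simp at hmem
  | cons a js ih =>
    simp only [List.flatMap_cons]
    by_cases ha : a = j0
    · subst ha
      rw [if_pos rfl, pv_flatMap_ind_nil e a js (by simp at hnd; exact hnd.1)]
      rfl
    · rw [if_neg ha, ih (List.nodup_cons.mp hnd).2
        (List.mem_of_ne_of_mem (fun h => ha h.symm) hmem)]
      rfl

theorem pvAInner_pow (ranks : List Int) (k i : Nat) (hi : i ≤ k) (js : List Nat)
    (hjs : ∀ j ∈ js, j ≤ k) :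
    pvAInner ranks (2 ^ k) (2 ^ i) js =
      js.flatMap (fun j => if j = k - i then
        [(pvMkGroups ranks (2 ^ i) (2 ^ (k - i)), ((2 ^ i : Nat) : Int), ((2 ^ (k - i) : Nat) : Int))]
        else []) := by
  induction js with
  | nil => rfl
  | cons j js ih =>
    have hjk : j ≤ k := hjs j List.mem_cons_self
    simp only [pvAInner, Nat.one_shiftLeft, List.flatMap_cons]
    rw [if_neg (by exact Nat.not_lt.mpr (Nat.pow_le_pow_right (by norm_num) hjk))]
    have hcond : (2 ^ i * 2 ^ j = 2 ^ k) ↔ j = k - i := by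
      rw [← pow_add]
      constructor
      · intro hp
        have := (Nat.pow_right_injective (le_refl 2)).eq_iff.mp hp
        omega
      · intro hj
        subst hj
        congr 1
        omega
    rw [ih (fun j hj => hjs j (List.mem_cons_of_mem _ hj))]
    by_cases hc : j = k - i
    · rw [if_pos (hcond.mpr hc), if_pos hc, hc]
    · rw [if_neg (fun hp => hc (hcond.mp hp)), if_neg hc]

theorem pvAOuter_pow (ranks : List Int) (k : Nat) (is : List Nat)
    (his : ∀ i ∈ is, i ≤ k) :
    pvAOuter ranks (2 ^ k) is =
      is.map (fun i =>
        (pvMkGroups ranks (2 ^ i) (2 ^ (k - i)), ((2 ^ i : Nat) : Int), ((2 ^ (k - i) : Nat) : Int))) := by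
  induction is with
  | nil => rfl
  | cons i is ih =>
    have hik : i ≤ k := his i List.mem_cons_self
    simp only [pvAOuter, Nat.one_shiftLeft, List.map_cons]
    rw [if_neg (by exact Nat.not_lt.mpr (Nat.pow_le_pow_right (by norm_num) hik))]
    rw [pv_bitLength_two_pow k,
      pvAInner_pow ranks k i hik (List.range (k + 1)) (fun j hj => by
        have := List.mem_range.mp hj; omega),
      pv_flatMap_ind _ (k - i) _ (List.nodup_range) (List.mem_range.mpr (by omega)),
      ih (fun a ha => his a (List.mem_cons_of_mem _ ha))]
    rfl

-- A returns [] when n is not a power of two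
theorem pvA_empty (ranks : List Int) (h : ∀ k : Nat, ranks.length ≠ 2 ^ k) :
    generate_sp_group_ranks_py ranks = [] := by
  unfold generate_sp_group_ranks_py
  exact pvAOuter_no_match ranks ranks.length
    (fun i j hc => h (i + j) (by rw [← pow_add] at hc; omega)) _

-- A on n = 2^k enumerates i = 0..k with ring degree 2^(k-i)
theorem pvA_pow (ranks : List Int) (k : Nat) (h : ranks.length = 2 ^ k) :
    generate_sp_group_ranks_py ranks =
      (List.range (k + 1)).map (fun i =>
        (pvMkGroups ranks (2 ^ i) (2 ^ (k - i)), ((2 ^ i : Nat) : Int), ((2 ^ (k - i) : Nat) : Int))) := by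
  simp only [generate_sp_group_ranks_py, h, pv_bitLength_two_pow]
  exact pvAOuter_pow ranks k _ (fun i hi => by have := List.mem_range.mp hi; omega)

-- ---- characterising B's bucket pass ----

theorem pv_getD_modify (bs : List (List Int)) (i g : Nat) (f : List Int → List Int) :
    (bs.modify i f).getD g [] = if i = g ∧ g < bs.length then f (bs.getD g []) else bs.getD g [] := by
  simp only [List.getD_eq_getElem?_getD, List.getElem?_modify]
  by_cases h : g < bs.length
  · rw [List.getElem?_eq_getElem h]
    by_cases hi : i = g <;> simp [hi, h]
  · rw [List.getElem?_eq_none (by omega)]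
    simp [h]

theorem pv_bucket_getD (key : Int → Nat) (xs : List Int) : ∀ (s : Int) (bs : List (List Int))
    (g : Nat), g < bs.length →
    ((PySem.List.enumerate xs s).foldl (fun bs p => bs.modify (key p.1) (· ++ [p.2])) bs).getD g [] =
      bs.getD g []
        ++ (((PySem.List.enumerate xs s).filter (fun p => key p.1 == g)).map (·.2)) := by
  induction xs with
  | nil => intro s bs g hg; simp [PySem.List.enumerate_nil]
  | cons x xs ih =>
    intro s bs g hg
    rw [PySem.List.enumerate_cons]
    simp only [List.foldl_cons, List.filter_cons]
    rw [ih (s+1) (bs.modify (key s) (· ++ [x])) g (by simpa using hg)]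
    rw [pv_getD_modify]
    by_cases hk : key s = g
    · simp [hk, hg]
    · simp [hk]

theorem pv_filter_single (xs : List Int) : ∀ (s j : Int),
    (((PySem.List.enumerate xs s).filter (fun p => p.1 == j)).map (·.2)) =
      if s ≤ j ∧ j < s + xs.length then [xs.getD (j - s).toNat 0] else [] := by
  induction xs with
  | nil => intro s j; simp [PySem.List.enumerate_nil]
  | cons x xs ih =>
    intro s j
    rw [PySem.List.enumerate_cons]
    simp only [List.filter_cons, List.length_cons]
    by_cases hs : s = j
    · subst hs
      have hnil : (PySem.List.enumerate xs (s+1)).filter (fun p => p.1 == s) = [] := by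
        apply List.filter_eq_nil_iff.mpr
        intro p hp
        obtain ⟨k, hk, rfl⟩ := (PySem.List.mem_enumerate_iff _ _ _).mp hp
        simp only [beq_iff_eq]
        omega
      simp only [beq_self_eq_true, if_pos, hnil]
      rw [if_pos (by constructor <;> [omega; (push_cast; omega)])]
      simp
    · rw [if_neg (by simpa using hs)]
      rw [ih (s+1) j]
      by_cases hc : s + 1 ≤ j ∧ j < s + 1 + xs.length
      · rw [if_pos hc, if_pos (by push_cast at hc ⊢; omega)]
        have h1 : (j - s).toNat = (j - (s+1)).toNat + 1 := by omega
        rw [h1]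
        simp
      · rw [if_neg hc, if_neg (by push_cast at hc ⊢; omega)]

theorem pv_mod_filter (u g : Nat) (hu : 0 < u) (hg : g < u) : ∀ (r : Nat) (xs : List Int) (c : Nat),
    xs.length = u * r →
    (((PySem.List.enumerate xs ((c * u : Nat) : Int)).filter
        (fun p => p.1.toNat % u == g)).map (·.2)) =
      (List.range r).map (fun t => xs.getD (g + u * t) 0) := by
  intro r
  induction r with
  | zero =>
    intro xs c hlen
    have : xs = [] := List.eq_nil_of_length_eq_zero (by omega)
    subst this
    simp [PySem.List.enumerate_nil]
  | succ r ih =>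
    intro xs c hlen
    have hxs : xs.take u ++ xs.drop u = xs := List.take_append_drop u xs
    have hmul : u * (r + 1) = u * r + u := by ring
    have lenB : (xs.take u).length = u := by simp [List.length_take]; omega
    have lenC : (xs.drop u).length = u * r := by simp [List.length_drop]; omega
    conv_lhs => rw [← hxs]
    rw [PySem.List.enumerate_append, List.filter_append, List.map_append, lenB]
    have hstart : ((c * u : Nat) : Int) + (u : Nat) = (((c+1) * u : Nat) : Int) := by
      push_cast; ring
    rw [hstart, ih (xs.drop u) (c+1) lenC]
    -- first block: exactly index c*u+g passes
    have hcongr : (PySem.List.enumerate (xs.take u) ((c * u : Nat) : Int)).filter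
          (fun p => p.1.toNat % u == g)
        = (PySem.List.enumerate (xs.take u) ((c * u : Nat) : Int)).filter
          (fun p => p.1 == ((c * u + g : Nat) : Int)) := by
      apply List.filter_congr
      intro p hp
      obtain ⟨k, hk, rfl⟩ := (PySem.List.mem_enumerate_iff _ _ _).mp hp
      rw [lenB] at hk
      have h1 : (((c * u : Nat) : Int) + (k : Nat)).toNat = c * u + k := by omega
      rw [h1]
      have h2 : (c * u + k) % u = k := by
        rw [Nat.add_comm, Nat.add_mul_mod_self_right]
        exact Nat.mod_eq_of_lt hk
      rw [h2]
      by_cases hkg : k = g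
      · subst hkg; simp
      · have : ¬ (((c * u : Nat) : Int) + (k : Nat) = ((c * u + g : Nat) : Int)) := by
          push_cast; omega
        simp [this]
    rw [hcongr, pv_filter_single]
    rw [if_pos ⟨by push_cast; omega, by rw [lenB]; push_cast; omega⟩]
    have hidx : ((((c * u + g : Nat) : Int)) - ((c * u : Nat) : Int)).toNat = g := by omega
    rw [hidx]
    -- assemble
    rw [List.range_succ_eq_map, List.map_cons, List.map_map, List.singleton_append]
    congr 1
    · -- head: (xs.take u).getD g 0 = xs.getD (g + u*0) 0
      simp only [Nat.mul_zero, Nat.add_zero, List.getD_eq_getElem?_getD, List.getElem?_take]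
      simp [hg]
    · -- tail
      apply List.map_congr_left
      intro t ht
      have h3 : u + (g + u * t) = g + u * (t + 1) := by ring
      simp only [Function.comp, List.getD_eq_getElem?_getD, List.getElem?_drop, h3]

theorem pv_div_filter (u r g : Nat) (hu : 0 < u) (hg : g < r) (xs : List Int)
    (hlen : xs.length = u * r) :
    (((PySem.List.enumerate xs 0).filter (fun p => p.1.toNat / u == g)).map (·.2)) =
      (xs.drop (g * u)).take u := by
  have hgu : g * u + u ≤ xs.length := by
    rw [hlen]
    calc g * u + u = (g + 1) * u := by ring
    _ ≤ r * u := Nat.mul_le_mul_right u (by omega)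
    _ = u * r := by ring
  have hxs : xs.take (g * u) ++ ((xs.drop (g * u)).take u ++ (xs.drop (g * u)).drop u) = xs := by
    rw [List.take_append_drop, List.take_append_drop]
  have lenA : (xs.take (g * u)).length = g * u := by simp [List.length_take]; omega
  have lenB : ((xs.drop (g * u)).take u).length = u := by
    simp [List.length_take, List.length_drop]; omega
  conv_lhs => rw [← hxs]
  rw [PySem.List.enumerate_append, PySem.List.enumerate_append,
    List.filter_append, List.filter_append, List.map_append, List.map_append, lenA, lenB]
  have hA : (PySem.List.enumerate (xs.take (g * u)) 0).filter (fun p => p.1.toNat / u == g) = [] := by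
    apply List.filter_eq_nil_iff.mpr
    intro p hp
    obtain ⟨k, hk, rfl⟩ := (PySem.List.mem_enumerate_iff _ _ _).mp hp
    rw [lenA] at hk
    have h1 : ((0 : Int) + (k : Nat)).toNat = k := by omega
    rw [h1]
    have : k / u < g := (Nat.div_lt_iff_lt_mul hu).mpr (by omega)
    simp; omega
  have hB : (PySem.List.enumerate ((xs.drop (g * u)).take u) ((0 : Int) + ((g * u : Nat) : Int))).filter
      (fun p => p.1.toNat / u == g) = PySem.List.enumerate ((xs.drop (g * u)).take u) ((0 : Int) + ((g * u : Nat) : Int)) := by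
    apply List.filter_eq_self.mpr
    intro p hp
    obtain ⟨k, hk, rfl⟩ := (PySem.List.mem_enumerate_iff _ _ _).mp hp
    rw [lenB] at hk
    have h1 : ((0 : Int) + ((g * u : Nat) : Int) + (k : Nat)).toNat = g * u + k := by omega
    rw [h1]
    have : (g * u + k) / u = g := by
      rw [Nat.mul_comm g u] at *
      rw [Nat.mul_add_div hu, Nat.div_eq_of_lt hk]
      omega
    simp [this]
  have hC : (PySem.List.enumerate ((xs.drop (g * u)).drop u)
        ((0 : Int) + ((g * u : Nat) : Int) + ((u : Nat) : Int))).filter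
      (fun p => p.1.toNat / u == g) = [] := by
    apply List.filter_eq_nil_iff.mpr
    intro p hp
    obtain ⟨k, hk, rfl⟩ := (PySem.List.mem_enumerate_iff _ _ _).mp hp
    have h1 : ((0 : Int) + ((g * u : Nat) : Int) + ((u : Nat) : Int) + (k : Nat)).toNat
        = g * u + u + k := by omega
    rw [h1]
    have : g + 1 ≤ (g * u + u + k) / u := by
      apply (Nat.le_div_iff_mul_le hu).mpr
      calc (g + 1) * u = g * u + u := by ring
      _ ≤ g * u + u + k := by omega
    simp; omega
  rw [hA, hB, hC]
  simp [PySem.List.map_snd_enumerate]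

theorem pv_filterMap_some {α β : Type} (f : α → Option β) (g : α → β) (l : List α)
    (h : ∀ x ∈ l, f x = some (g x)) : l.filterMap f = l.map g := by
  induction l with
  | nil => rfl
  | cons a l ih =>
    simp only [List.filterMap_cons, h a List.mem_cons_self, List.map_cons]
    rw [ih (fun x hx => h x (List.mem_cons_of_mem _ hx))]

theorem pv_slice_stride (xs : List Int) (u g r : Nat) (hu : 0 < u) (hg : g < u)
    (hlen : xs.length = u * r) :
    (PySem.List.slice? xs (some (g : Int)) none (u : Int)).getD [] =
      (List.range r).map (fun t => xs.getD (g + u * t) 0) := by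
  unfold PySem.List.slice? PySem.List.sliceIndices
  have hu' : ((u : Nat) : Int) ≠ 0 := by omega
  have hunn : ¬ ((u : Nat) : Int) < 0 := by omega
  rw [if_neg hu']
  simp only [hunn, if_false]
  rcases Nat.eq_zero_or_pos r with hr | hr
  · subst hr
    have hxs : xs = [] := List.eq_nil_of_length_eq_zero (by omega)
    subst hxs
    simp
  · -- start = g (g ≥ 0, min g n = g), stop = n
    have hn : 0 < xs.length := by
      rw [hlen]; positivity
    have hstart : ¬ ((g : Int) < 0) := by omega
    have hmin : min ((g : Nat) : Int) ((xs.length : Nat) : Int) = (g : Int) := by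
      rw [min_eq_left]
      rw [hlen]
      have : g < u * r := lt_of_lt_of_le hg (Nat.le_mul_of_pos_right u hr)
      omega
    simp only [hstart, if_false, hmin]
    have hlt : (g : Int) < (xs.length : Int) := by
      rw [hlen]
      have : g < u * r := lt_of_lt_of_le hg (Nat.le_mul_of_pos_right u hr)
      omega
    have hpos : (0 : Int) < (u : Int) := by omega
    rw [if_pos hpos, if_pos hlt]
    have hd : u - 1 - g < u := by omega
    have hcount : (((xs.length : Int) - (g : Int) + (u : Int) - 1) / (u : Int)).toNat = r := by
      have h1 : (xs.length : Int) - (g : Int) + (u : Int) - 1 = ((u * r + (u - 1 - g) : Nat) : Int) := by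
        rw [hlen]; push_cast; omega
      rw [h1, ← Int.natCast_div]
      rw [Int.toNat_natCast]
      rw [Nat.add_comm, Nat.add_mul_div_left _ _ hu, Nat.div_eq_of_lt hd]
      omega
    rw [hcount]
    simp only [Option.getD_some]
    apply pv_filterMap_some
    intro k hk
    have hk' : k < r := List.mem_range.mp hk
    have hidx : (((g : Nat) : Int) + ((u : Nat) : Int) * ((k : Nat) : Int)).toNat = g + u * k := by
      push_cast; omega
    rw [hidx]
    have hlt2 : g + u * k < xs.length := by
      rw [hlen]
      have : u * k + u ≤ u * r := by
        calc u * k + u = u * (k + 1) := by ring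
        _ ≤ u * r := Nat.mul_le_mul_left u (by omega)
      omega
    rw [List.getElem?_eq_getElem hlt2, List.getD_eq_getElem?_getD, List.getElem?_eq_getElem hlt2]
    rfl

theorem pvDist_split (u : Nat) (l : List (Int × Int)) (a b : List (List Int)) :
    l.foldl (pvDistStep u) (a, b) =
      (l.foldl (fun bs p => bs.modify (p.1.toNat / u) (· ++ [p.2])) a,
       l.foldl (fun bs p => bs.modify (p.1.toNat % u) (· ++ [p.2])) b) := by
  induction l generalizing a b with
  | nil => rfl
  | cons p l ih => simp [pvDistStep, ih]

theorem pv_bucket_length (key : Int → Nat) (l : List (Int × Int)) (bs : List (List Int)) :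
    (l.foldl (fun bs p => bs.modify (key p.1) (· ++ [p.2])) bs).length = bs.length := by
  induction l generalizing bs with
  | nil => rfl
  | cons p l ih => simp [ih]

theorem pvB_groups (ranks : List Int) (u r : Nat) (hu : 0 < u) (hlen : ranks.length = u * r) :
    (((PySem.List.enumerate ranks).foldl (pvDistStep u)
        (List.replicate r [], List.replicate u [])).1
     ++ ((PySem.List.enumerate ranks).foldl (pvDistStep u)
        (List.replicate r [], List.replicate u [])).2) = pvMkGroups ranks u r := by
  rw [pvDist_split]
  unfold pvMkGroups
  congr 1
  · -- ulysses part
    apply List.ext_getElem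
    · rw [pv_bucket_length (fun i => i.toNat / u)]
      simp
    · intro g h1 h2
      have hgr : g < r := by
        rw [pv_bucket_length (fun i => i.toNat / u)] at h1; simpa using h1
      rw [← List.getD_eq_getElem _ [] h1, ← List.getD_eq_getElem _ [] h2]
      rw [pv_bucket_getD (fun i => i.toNat / u) ranks 0 (List.replicate r []) g (by simpa using hgr)]
      rw [List.getD_replicate, List.nil_append]
      rw [pv_div_filter u r g hu hgr ranks hlen]
      rw [List.getD_eq_getElem _ [] h2]
      simp only [List.getElem_map, List.getElem_range]
      have hc1 : ((g : Int) * u) = ((g * u : Nat) : Int) := by push_cast; ring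
      have hc2 : (((g : Int) + 1) * u) = (((g * u + u : Nat) : Int)) := by push_cast; ring
      rw [hc1, hc2, PySem.List.slice_natCast]
      · congr 1
        omega
      · exact hgr
  · -- ring part
    apply List.ext_getElem
    · rw [pv_bucket_length (fun i => i.toNat % u)]
      simp
    · intro g h1 h2
      have hgu : g < u := by
        rw [pv_bucket_length (fun i => i.toNat % u)] at h1; simpa using h1
      rw [← List.getD_eq_getElem _ [] h1, ← List.getD_eq_getElem _ [] h2]
      rw [pv_bucket_getD (fun i => i.toNat % u) ranks 0 (List.replicate u []) g (by simpa using hgu)]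
      rw [List.getD_replicate, List.nil_append]
      have h0 : (0 : Int) = ((0 * u : Nat) : Int) := by push_cast; ring
      rw [h0, pv_mod_filter u g hu hgu r ranks 0 hlen]
      rw [List.getD_eq_getElem _ [] h2]
      simp only [List.getElem_map, List.getElem_range]
      rw [pv_slice_stride ranks u g r hu hgu hlen]
      exact hgu

-- ===== VERDICT (by name: the statement is the Claim_ definition above) =====
theorem generate_sp_group_ranks_py_spec : Claim_equal_generate_sp_group_ranks_py := by
  intro ranks _
  unfold Spec_generate_sp_group_ranks_py generate_sp_group_ranks_py_alt
  by_cases hz : ranks.length = 0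
  · simp only [hz]
    have : generate_sp_group_ranks_py ranks = [] := by
      unfold generate_sp_group_ranks_py
      simp [hz, PySem.Int.bitLength_zero, pvAOuter]
    simp [this]
  · by_cases hp : ∃ k, ranks.length = 2 ^ k
    · obtain ⟨k, hk⟩ := hp
      have hband : PySem.Int.band (ranks.length : Int) ((ranks.length : Int) - 1) = 0 := by
        have h1 : ((ranks.length : Int) - 1) = ((ranks.length - 1 : Nat) : Int) := by
          omega
        rw [h1, PySem.Int.band_natCast]
        have := (pv_land_pred_eq_zero_iff ranks.length hz).mpr ⟨k, hk⟩
        simp [this]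
      rw [if_neg (by simp [hz, hband])]
      rw [pvA_pow ranks k hk]
      rw [show ranks.length = 2 ^ k from hk] -- in the remaining occurrences
      rw [pv_bitLength_two_pow]
      refine List.map_congr_left (fun i hi => ?_)
      have hik : i ≤ k := by have := List.mem_range.mp hi; omega
      have hshift : (2 ^ k) >>> i = 2 ^ (k - i) := by
        rw [Nat.shiftRight_eq_div_pow, Nat.pow_div hik (by norm_num)]
      have hlen2 : ranks.length = 2 ^ i * 2 ^ (k - i) := by
        rw [hk, ← pow_add]; congr 1; omega
      simp only [Nat.one_shiftLeft, hshift]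
      rw [pvB_groups ranks (2 ^ i) (2 ^ (k - i)) (by positivity) hlen2]
    · have hband : PySem.Int.band (ranks.length : Int) ((ranks.length : Int) - 1) ≠ 0 := by
        have h1 : ((ranks.length : Int) - 1) = ((ranks.length - 1 : Nat) : Int) := by
          omega
        rw [h1, PySem.Int.band_natCast]
        intro hc
        exact hp ((pv_land_pred_eq_zero_iff ranks.length hz).mp (by exact_mod_cast hc))
      rw [if_pos (Or.inr hband)]
      exact pvA_empty ranks (fun k hk => hp ⟨k, hk⟩)
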